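-- pv_equiv track=rewrite | github.com/zacharyxpku-boop/ShootAssist | ml/convert_coreml.py | generate_swift_constants
-- ===== SOURCE A (Python) =====
-- def generate_swift_constants(labels: list) -> str:
--     """生成 Swift 标签映射，供 GestureClassifierService 使用。"""
--     emoji_map = {
--         "raise_both_hands": ("🙌", "双手举高"),
--         "point_up":         ("☝️", "指天"),
--         "heart":            ("🫶", "比心"),
--         "clap":             ("👏", "拍手"),
--         "spread_arms":      ("🤸", "展开双臂"),
--         "fly_kiss":         ("😘", "飞吻"),
--         "cover_face":       ("🤭", "捂脸卖萌"),
--         "hands_on_hips":    ("🤗", "叉腰"),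
--         "cross_arms":       ("🙅", "双手交叉"),
--         "chin_rest":        ("🤔", "托腮"),
--         "neutral":          (nil_str := "nil", ""),
--     }
--
--     lines = [
--         "// GestureLabels.swift — 由 convert_coreml.py 自动生成，请勿手动修改",
--         "// 将此文件和 GestureClassifier.mlmodel 一起拖入 Xcode",
--         "",
--         "import Foundation",
--         "",
--         "enum GestureLabel: Int, CaseIterable {",
--     ]
--     for i, label in enumerate(labels):
--         lines.append(f"    case {label} = {i}")
--     lines += [
--         "}",
--         "",
--         "extension GestureLabel {",
--         "    var emoji: String? {",
--         "        switch self {",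
--     ]
--     for label in labels:
--         info = emoji_map.get(label, (None, ""))
--         emoji = info[0]
--         if emoji == "nil":
--             lines.append(f'        case .{label}: return nil')
--         else:
--             lines.append(f'        case .{label}: return "{emoji}"')
--     lines += [
--         "        }",
--         "    }",
--         "",
--         "    var description: String {",
--         "        switch self {",
--     ]
--     for label in labels:
--         info = emoji_map.get(label, (None, ""))
--         desc = info[1]
--         lines.append(f'        case .{label}: return "{desc}"')
--     lines += [
--         "        }",
--         "    }",
--         "}",
--     ]
--     return "\n".join(lines) + "\n"
-- ===== SOURCE B (Python) =====
-- def generate_swift_constants(labels: list) -> str: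
--     """Single pass over labels building the three per-label line lists at once."""
--     emoji_map = {
--         "raise_both_hands": ("🙌", "双手举高"),
--         "point_up":         ("☝️", "指天"),
--         "heart":            ("🫶", "比心"),
--         "clap":             ("👏", "拍手"),
--         "spread_arms":      ("🤸", "展开双臂"),
--         "fly_kiss":         ("😘", "飞吻"),
--         "cover_face":       ("🤭", "捂脸卖萌"),
--         "hands_on_hips":    ("🤗", "叉腰"),
--         "cross_arms":       ("🙅", "双手交叉"),
--         "chin_rest":        ("🤔", "托腮"),
--         "neutral":          ("nil", ""),
--     }
--     enum_lines, emoji_lines, desc_lines = [], [], []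
--     for i, label in enumerate(labels):
--         enum_lines.append(f"    case {label} = {i}")
--         emoji, desc = emoji_map.get(label, (None, ""))
--         if emoji == "nil":
--             emoji_lines.append(f'        case .{label}: return nil')
--         else:
--             emoji_lines.append(f'        case .{label}: return "{emoji}"')
--         desc_lines.append(f'        case .{label}: return "{desc}"')
--     parts = (
--         [
--             "// GestureLabels.swift — 由 convert_coreml.py 自动生成，请勿手动修改",
--             "// 将此文件和 GestureClassifier.mlmodel 一起拖入 Xcode",
--             "",
--             "import Foundation",
--             "",
--             "enum GestureLabel: Int, CaseIterable {",
--         ]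
--         + enum_lines
--         + ["}", "", "extension GestureLabel {", "    var emoji: String? {", "        switch self {"]
--         + emoji_lines
--         + ["        }", "    }", "", "    var description: String {", "        switch self {"]
--         + desc_lines
--         + ["        }", "    }", "}"]
--     )
--     return "\n".join(parts) + "\n"
-- ===== Notes on version B (the rewrite author's own statement) =====
-- stated objective: simpler
-- what changed: B makes one pass over labels building the three per-label line lists (enum case, emoji switch case, description case) simultaneously, then concatenates them with the fixed fragments, instead of A's three separate loops each appending into one growing lines list.
import Mathlib
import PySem

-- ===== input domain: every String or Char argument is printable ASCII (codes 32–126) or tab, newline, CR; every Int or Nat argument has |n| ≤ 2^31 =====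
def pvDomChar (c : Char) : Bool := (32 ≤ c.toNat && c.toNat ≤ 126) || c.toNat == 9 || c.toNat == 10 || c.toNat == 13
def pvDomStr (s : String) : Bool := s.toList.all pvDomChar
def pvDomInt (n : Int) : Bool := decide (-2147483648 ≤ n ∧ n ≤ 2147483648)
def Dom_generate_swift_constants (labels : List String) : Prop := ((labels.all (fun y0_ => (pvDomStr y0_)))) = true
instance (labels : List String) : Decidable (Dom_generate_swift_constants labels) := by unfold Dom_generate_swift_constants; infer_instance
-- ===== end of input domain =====

-- B makes ONE pass over labels building the three per-label line lists at once; A makes three passes. Same output, provably.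

-- shared data: the emoji map both Pythons define literally (value = (Optional emoji, description); "neutral"'s stored emoji is the string "nil")
def gscEmojiMap : PySem.Dict String (Option String × String) :=
  PySem.Dict.ofList [("raise_both_hands", (some "🙌", "双手举高")),
   ("point_up",         (some "☝️", "指天")),
   ("heart",            (some "🫶", "比心")),
   ("clap",             (some "👏", "拍手")),
   ("spread_arms",      (some "🤸", "展开双臂")),
   ("fly_kiss",         (some "😘", "飞吻")),
   ("cover_face",       (some "🤭", "捂脸卖萌")),
   ("hands_on_hips",    (some "🤗", "叉腰")),
   ("cross_arms",       (some "🙅", "双手交叉")),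
   ("chin_rest",        (some "🤔", "托腮")),
   ("neutral",          (some "nil", ""))]

-- Python f"{emoji}" where emoji : Optional[str]: None prints as "None"
def gscOptStr : Option String → String
  | none => "None"
  | some s => s

def gscHeader : List String :=
  ["// GestureLabels.swift — 由 convert_coreml.py 自动生成，请勿手动修改",
   "// 将此文件和 GestureClassifier.mlmodel 一起拖入 Xcode",
   "",
   "import Foundation",
   "",
   "enum GestureLabel: Int, CaseIterable {"]

def gscMid1 : List String :=
  ["}", "", "extension GestureLabel {", "    var emoji: String? {", "        switch self {"]

def gscMid2 : List String :=
  ["        }", "    }", "", "    var description: String {", "        switch self {"]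

def gscTail : List String := ["        }", "    }", "}"]

-- ===== PORT A =====
def generate_swift_constants (labels : List String) : String :=
  let lines := gscHeader
  let lines := (PySem.List.enumerate labels).foldl
    (fun acc p => acc ++ ["    case " ++ p.2 ++ " = " ++ PySem.Int.toStr p.1]) lines
  let lines := lines ++ gscMid1
  let lines := labels.foldl
    (fun acc label =>
      let info := PySem.Dict.getD gscEmojiMap label (none, "")
      let emoji := info.1
      if emoji == some "nil" then
        acc ++ ["        case ." ++ label ++ ": return nil"]
      else
        acc ++ ["        case ." ++ label ++ ": return \"" ++ gscOptStr emoji ++ "\""]) lines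
  let lines := lines ++ gscMid2
  let lines := labels.foldl
    (fun acc label =>
      let info := PySem.Dict.getD gscEmojiMap label (none, "")
      let desc := info.2
      acc ++ ["        case ." ++ label ++ ": return \"" ++ desc ++ "\""]) lines
  let lines := lines ++ gscTail
  PySem.Str.join "\n" lines ++ "\n"

-- ===== PORT B =====
def generate_swift_constants_alt (labels : List String) : String :=
  let t := (PySem.List.enumerate labels).foldl
    (fun (acc : List String × List String × List String) p =>
      let i := p.1
      let label := p.2
      let enum_lines := acc.1 ++ ["    case " ++ label ++ " = " ++ PySem.Int.toStr i]
      let info := PySem.Dict.getD gscEmojiMap label (none, "")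
      let emoji := info.1
      let desc := info.2
      let emoji_lines :=
        if emoji == some "nil" then
          acc.2.1 ++ ["        case ." ++ label ++ ": return nil"]
        else
          acc.2.1 ++ ["        case ." ++ label ++ ": return \"" ++ gscOptStr emoji ++ "\""]
      let desc_lines := acc.2.2 ++ ["        case ." ++ label ++ ": return \"" ++ desc ++ "\""]
      (enum_lines, emoji_lines, desc_lines)) ([], [], [])
  PySem.Str.join "\n" (gscHeader ++ t.1 ++ gscMid1 ++ t.2.1 ++ gscMid2 ++ t.2.2 ++ gscTail) ++ "\n"

-- ===== PRECONDITION & SPEC =====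
def Spec_generate_swift_constants (labels : List String) (out : String) : Prop := out = generate_swift_constants_alt labels
instance (labels : List String) (out : String) : Decidable (Spec_generate_swift_constants labels out) := by unfold Spec_generate_swift_constants; infer_instance

-- ===== CLAIM (what is proved, stated in full; the proofs are below) =====
def Claim_equal_generate_swift_constants : Prop := ∀ (labels : List String), Dom_generate_swift_constants labels → Spec_generate_swift_constants labels (generate_swift_constants labels)

-- ===== LEMMAS AND PROOFS =====

-- per-label line builders (proof-only abbreviations)
def gscEnumLine (p : Int × String) : String := "    case " ++ p.2 ++ " = " ++ PySem.Int.toStr p.1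

def gscEmojiLine (label : String) : String :=
  let emoji := (PySem.Dict.getD gscEmojiMap label (none, "")).1
  if emoji == some "nil" then "        case ." ++ label ++ ": return nil"
  else "        case ." ++ label ++ ": return \"" ++ gscOptStr emoji ++ "\""

def gscDescLine (label : String) : String :=
  "        case ." ++ label ++ ": return \"" ++ (PySem.Dict.getD gscEmojiMap label (none, "")).2 ++ "\""

theorem gsc_foldl_if {α : Type} (q : α → Bool) (f g : α → String) :
    ∀ (xs : List α) (acc : List String),
      xs.foldl (fun a x => if q x then a ++ [f x] else a ++ [g x]) acc
        = acc ++ xs.map (fun x => if q x then f x else g x) := by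
  intro xs
  induction xs with
  | nil => simp
  | cons x xs ih =>
    intro acc
    simp only [List.foldl_cons, List.map_cons, ih]
    by_cases h : q x = true <;> simp [h]

theorem gsc_a_emoji_fold (labels : List String) (acc : List String) :
    labels.foldl
      (fun acc label =>
        let info := PySem.Dict.getD gscEmojiMap label (none, "")
        let emoji := info.1
        if emoji == some "nil" then
          acc ++ ["        case ." ++ label ++ ": return nil"]
        else
          acc ++ ["        case ." ++ label ++ ": return \"" ++ gscOptStr emoji ++ "\""]) acc
      = acc ++ labels.map gscEmojiLine := by
  exact gsc_foldl_if (fun label => (PySem.Dict.getD gscEmojiMap label (none, "")).1 == some "nil")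
      (fun label => "        case ." ++ label ++ ": return nil")
      (fun label => "        case ." ++ label ++ ": return \"" ++ gscOptStr (PySem.Dict.getD gscEmojiMap label (none, "")).1 ++ "\"")
      labels acc

theorem gsc_a_enum_fold (xs : List (Int × String)) (acc : List String) :
    xs.foldl (fun acc p => acc ++ ["    case " ++ p.2 ++ " = " ++ PySem.Int.toStr p.1]) acc
      = acc ++ xs.map gscEnumLine :=
  PySem.List.foldl_append_singleton_eq_map (f := gscEnumLine) (l := xs) (acc := acc)

theorem gsc_a_desc_fold (labels : List String) (acc : List String) :
    labels.foldl
      (fun acc label =>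
        let info := PySem.Dict.getD gscEmojiMap label (none, "")
        let desc := info.2
        acc ++ ["        case ." ++ label ++ ": return \"" ++ desc ++ "\""]) acc
      = acc ++ labels.map gscDescLine :=
  PySem.List.foldl_append_singleton_eq_map (f := gscDescLine) (l := labels) (acc := acc)

theorem gsc_b_fold (labels : List String) :
    ∀ (a b c : List String),
      (PySem.List.enumerate labels).foldl
        (fun (acc : List String × List String × List String) p =>
          let i := p.1
          let label := p.2
          let enum_lines := acc.1 ++ ["    case " ++ label ++ " = " ++ PySem.Int.toStr i]
          let info := PySem.Dict.getD gscEmojiMap label (none, "")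
          let emoji := info.1
          let desc := info.2
          let emoji_lines :=
            if emoji == some "nil" then
              acc.2.1 ++ ["        case ." ++ label ++ ": return nil"]
            else
              acc.2.1 ++ ["        case ." ++ label ++ ": return \"" ++ gscOptStr emoji ++ "\""]
          let desc_lines := acc.2.2 ++ ["        case ." ++ label ++ ": return \"" ++ desc ++ "\""]
          (enum_lines, emoji_lines, desc_lines)) (a, b, c)
      = (a ++ (PySem.List.enumerate labels).map gscEnumLine,
         b ++ labels.map gscEmojiLine,
         c ++ labels.map gscDescLine) := by
  -- generalize the start index of enumerate
  suffices h : ∀ (s : Int) (ls : List String) (a b c : List String),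
      (PySem.List.enumerate ls s).foldl
        (fun (acc : List String × List String × List String) p =>
          let i := p.1
          let label := p.2
          let enum_lines := acc.1 ++ ["    case " ++ label ++ " = " ++ PySem.Int.toStr i]
          let info := PySem.Dict.getD gscEmojiMap label (none, "")
          let emoji := info.1
          let desc := info.2
          let emoji_lines :=
            if emoji == some "nil" then
              acc.2.1 ++ ["        case ." ++ label ++ ": return nil"]
            else
              acc.2.1 ++ ["        case ." ++ label ++ ": return \"" ++ gscOptStr emoji ++ "\""]
          let desc_lines := acc.2.2 ++ ["        case ." ++ label ++ ": return \"" ++ desc ++ "\""]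
          (enum_lines, emoji_lines, desc_lines)) (a, b, c)
      = (a ++ (PySem.List.enumerate ls s).map gscEnumLine,
         b ++ ls.map gscEmojiLine,
         c ++ ls.map gscDescLine) by
    exact h 0 labels
  intro s ls
  induction ls generalizing s with
  | nil => intro a b c; simp [PySem.List.enumerate_nil]
  | cons x xs ih =>
    intro a b c
    rw [PySem.List.enumerate_cons]
    simp only [List.foldl_cons, List.map_cons]
    rw [ih (s + 1)]
    by_cases h : ((PySem.Dict.getD gscEmojiMap x (none, "")).1 == some "nil") = true <;>
      simp [h, gscEnumLine, gscEmojiLine, gscDescLine]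

-- ===== VERDICT (by name: the statement is the Claim_ definition above) =====
theorem generate_swift_constants_spec : Claim_equal_generate_swift_constants := by
  intro labels _
  show generate_swift_constants labels = generate_swift_constants_alt labels
  simp only [generate_swift_constants, generate_swift_constants_alt]
  rw [gsc_b_fold labels [] [] []]
  rw [gsc_a_emoji_fold]
  rw [gsc_a_enum_fold]
  rw [gsc_a_desc_fold]
  simp [List.append_assoc]
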